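-- pv_equiv track=rewrite | github.com/Arize-ai/phoenix | src/phoenix/server/cost_tracking/regex_specificity.py | _strip_anchors
-- ===== SOURCE A (Python) =====
-- def _strip_anchors(pattern: str) -> str:
--     """
--     Remove all leading inline flags and anchors from pattern for content analysis.
--     Handles multiple inline flags robustly.
--     """
--     i = 0
--     # Remove all leading inline flags
--     while pattern.startswith("(?", i):
--         close = pattern.find(")", i)
--         if close == -1:
--             break
--         i = close + 1
--     # Remove start anchor
--     if i < len(pattern) and pattern[i] == "^":
--         i += 1
--     content = pattern[i:]
--     # Remove end anchor
--     if content.endswith("$"):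
--         content = content[:-1]
--     return content
-- ===== SOURCE B (Python) =====
-- def _strip_anchors(pattern: str) -> str:
--     def drop_flags(s: str) -> str:
--         if s.startswith("(?"):
--             head, sep, tail = s.partition(")")
--             if sep:
--                 return drop_flags(tail)
--         return s
--     content = drop_flags(pattern)
--     if content.startswith("^"):
--         content = content[1:]
--     if content.endswith("$"):
--         content = content[:-1]
--     return content
-- ===== Notes on version B (the rewrite author's own statement) =====
-- stated objective: simpler
-- what changed: Replaces the index-bookkeeping while-loop (startswith at offset i, find from i, manual i arithmetic) with a structural recursion over string suffixes using str.partition, and anchor stripping via startswith/slicing instead of index tests.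
import Mathlib
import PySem

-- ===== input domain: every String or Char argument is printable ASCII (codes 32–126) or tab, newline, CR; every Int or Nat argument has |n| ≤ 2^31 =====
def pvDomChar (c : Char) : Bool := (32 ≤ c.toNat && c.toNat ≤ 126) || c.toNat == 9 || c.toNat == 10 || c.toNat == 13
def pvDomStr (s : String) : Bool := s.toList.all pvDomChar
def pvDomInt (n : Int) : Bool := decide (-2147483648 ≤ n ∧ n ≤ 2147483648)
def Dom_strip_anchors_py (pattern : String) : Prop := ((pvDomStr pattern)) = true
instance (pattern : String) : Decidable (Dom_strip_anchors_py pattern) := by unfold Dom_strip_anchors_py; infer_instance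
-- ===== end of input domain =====

-- B replaces A's manual index while-loop with a structural recursion over suffixes (partition-based); same cost, simpler code.

-- ===== PORT A =====
-- A's while loop: i advances past each leading "(?...)" group. startswith("(?", i) is ported as a
-- prefix test on s.drop i (exact: 0 ≤ i ≤ len(s) holds throughout); close = find(")", i) is
-- Chars.findFrom (close inlined; close ≥ i ≥ 0 whenever ≠ -1, so .toNat is exact).
def loopA (s : List Char) (i : Nat) : Nat :=
  if h : PySem.Chars.startswith (s.drop i) ['(', '?'] then
    if hc : PySem.Chars.findFrom s [')'] (i : Int) none = -1 then i
    else loopA s ((PySem.Chars.findFrom s [')'] (i : Int) none).toNat + 1)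
  else i
  termination_by s.length - i
  decreasing_by
    have hpre : ['(', '?'] <+: s.drop i := (PySem.Chars.startswith_iff _ _).mp h
    have hlen : 2 ≤ (s.drop i).length := hpre.length_le
    rw [List.length_drop] at hlen
    obtain ⟨hk, -, -⟩ := PySem.Chars.findFrom_natCast_spec s [')'] i (by omega) hc
    omega

def strip_anchors_py (pattern : String) : String :=
  let s := pattern.toList
  let i := loopA s 0
  -- if i < len(pattern) and pattern[i] == "^": i += 1
  let i := if decide (i < s.length) && (PySem.List.pyGet? s (i : Int) == some '^') then i + 1 else i
  -- content = pattern[i:]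
  let content := PySem.List.slice s (some (i : Int)) none
  -- if content.endswith("$"): content = content[:-1]
  let content := if PySem.Chars.endswith content ['$'] then PySem.List.slice content none (some (-1)) else content
  String.ofList content

-- ===== PORT B =====
-- B's drop_flags: str.partition(")") is ported exactly via first-occurrence find and drop past it
-- (sep nonempty ↔ find ≠ -1, tail = s[find+1:]); recursion on the suffix.
def dropFlagsB (s : List Char) : List Char :=
  if PySem.Chars.startswith s ['(', '?'] then
    if PySem.Chars.find s [')'] = -1 then s
    else dropFlagsB (s.drop ((PySem.Chars.find s [')']).toNat + 1))
  else s
  termination_by s.length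
  decreasing_by
    have hpre : ['(', '?'] <+: s := (PySem.Chars.startswith_iff _ _).mp (by assumption)
    have hlen : 2 ≤ s.length := hpre.length_le
    simp only [List.length_drop]
    omega

def strip_anchors_py_alt (pattern : String) : String :=
  let content := dropFlagsB pattern.toList
  -- if content.startswith("^"): content = content[1:]
  let content := if PySem.Chars.startswith content ['^'] then PySem.List.slice content (some 1) none else content
  -- if content.endswith("$"): content = content[:-1]
  let content := if PySem.Chars.endswith content ['$'] then PySem.List.slice content none (some (-1)) else content
  String.ofList content

-- ===== PRECONDITION & SPEC =====
def Spec_strip_anchors_py (pattern : String) (out : String) : Prop := out = strip_anchors_py_alt pattern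
instance (pattern : String) (out : String) : Decidable (Spec_strip_anchors_py pattern out) := by unfold Spec_strip_anchors_py; infer_instance

-- ===== CLAIM (what is proved, stated in full; the proofs are below) =====
def Claim_equal_strip_anchors_py : Prop := ∀ (pattern : String), Dom_strip_anchors_py pattern → Spec_strip_anchors_py pattern (strip_anchors_py pattern)

-- ===== LEMMAS AND PROOFS =====

theorem loopA_le (s : List Char) (i : Nat) (hi : i ≤ s.length) : loopA s i ≤ s.length := by
  fun_induction loopA s i with
  | case1 i h hc => exact hi
  | case2 i h hc ih =>
      apply ih
      have hpre : ['(', '?'] <+: s.drop i := (PySem.Chars.startswith_iff _ _).mp h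
      have hlen : 2 ≤ (s.drop i).length := hpre.length_le
      rw [List.length_drop] at hlen
      obtain ⟨hk, hp, -⟩ := PySem.Chars.findFrom_natCast_spec s [')'] i (by omega) hc
      have hne : s.drop (PySem.Chars.findFrom s [')'] (i : Int) none).toNat ≠ [] := by
        intro hnil; rw [hnil] at hp; exact absurd (List.prefix_nil.mp hp) (by simp)
      have hlt : (PySem.Chars.findFrom s [')'] (i : Int) none).toNat < s.length := by
        by_contra hge
        exact hne (List.drop_eq_nil_of_le (by omega))
      omega
  | case3 i h => exact hi

theorem loop_eq (s : List Char) (i : Nat) (hi : i ≤ s.length) :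
    s.drop (loopA s i) = dropFlagsB (s.drop i) := by
  fun_induction loopA s i with
  | case1 i h hc =>
      -- A stops (close = -1); B: find on s.drop i is -1 so it returns s.drop i
      have hpre : ['(', '?'] <+: s.drop i := (PySem.Chars.startswith_iff _ _).mp h
      have hlen2 : 2 ≤ (s.drop i).length := hpre.length_le
      rw [List.length_drop] at hlen2
      rw [PySem.Chars.findFrom_natCast s [')'] i (by omega)] at hc
      have hf : PySem.Chars.find (s.drop i) [')'] = -1 := by
        by_contra hf
        rw [if_neg hf] at hc
        have hfn : 0 ≤ PySem.Chars.find (s.drop i) [')'] :=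
          (PySem.Chars.find_nonneg_iff _ _).mpr ((PySem.Chars.find_ne_neg_one_iff _ _).mp hf)
        omega
      rw [dropFlagsB]
      simp [h, hf]
  | case2 i h hc ih =>
      have hpre : ['(', '?'] <+: s.drop i := (PySem.Chars.startswith_iff _ _).mp h
      have hlen2 : 2 ≤ (s.drop i).length := hpre.length_le
      rw [List.length_drop] at hlen2
      have hi' : i ≤ s.length := by omega
      have hfrom := PySem.Chars.findFrom_natCast s [')'] i hi'
      have hf : ¬ PySem.Chars.find (s.drop i) [')'] = -1 := by
        intro hf; rw [hfrom, if_pos hf] at hc; exact hc rfl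
      rw [hfrom, if_neg hf] at ih hc ⊢
      have hfn : 0 ≤ PySem.Chars.find (s.drop i) [')'] :=
        (PySem.Chars.find_nonneg_iff _ _).mpr ((PySem.Chars.find_ne_neg_one_iff _ _).mp hf)
      have hfl : PySem.Chars.find (s.drop i) [')'] ≤ (s.drop i).length :=
        PySem.Chars.find_le_length _ _
      rw [List.length_drop] at hfl
      have harg : ((i : Int) + PySem.Chars.find (s.drop i) [')']).toNat + 1
          = i + ((PySem.Chars.find (s.drop i) [')']).toNat + 1) := by omega
      have hp : [')'] <+: (s.drop i).drop (PySem.Chars.find (s.drop i) [')']).toNat := by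
        exact (PySem.Chars.find_spec hfn).1
      have hne : (s.drop i).drop (PySem.Chars.find (s.drop i) [')']).toNat ≠ [] := by
        intro hnil; rw [hnil] at hp; exact absurd (List.prefix_nil.mp hp) (by simp)
      have hltf : (PySem.Chars.find (s.drop i) [')']).toNat < (s.drop i).length := by
        by_contra hge
        exact hne (List.drop_eq_nil_of_le (by omega))
      rw [List.length_drop] at hltf
      rw [harg] at ih ⊢
      rw [ih (by omega)]
      conv_rhs => rw [dropFlagsB]
      rw [if_pos h, if_neg hf]
      rw [show List.drop ((PySem.Chars.find (List.drop i s) [')']).toNat + 1) (List.drop i s)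
            = List.drop (i + ((PySem.Chars.find (List.drop i s) [')']).toNat + 1)) s from by
        rw [List.drop_drop]]
  | case3 i h =>
      rw [dropFlagsB]
      simp [h]

theorem cond_eq (s : List Char) (i : Nat) :
    (decide (i < s.length) && (PySem.List.pyGet? s (i : Int) == some '^'))
      = PySem.Chars.startswith (s.drop i) ['^'] := by
  rw [PySem.List.pyGet?_natCast]
  cases ht : s.drop i with
  | nil =>
      have hge : s.length ≤ i := by
        have := congrArg List.length ht
        simp only [List.length_drop, List.length_nil] at this
        omega
      have h2 : PySem.Chars.startswith ([] : List Char) ['^'] = false := by decide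
      rw [h2]
      simp [Nat.not_lt.mpr hge]
  | cons a t =>
      have hlt : i < s.length := by
        have := congrArg List.length ht
        simp only [List.length_drop, List.length_cons] at this
        omega
      have hgi : s[i]? = some a := by
        have h0 : (s.drop i)[0]? = s[i + 0]? := List.getElem?_drop
        rw [ht] at h0
        simpa using h0.symm
      rw [hgi]
      by_cases ha : a = '^'
      · subst ha
        have hsw : PySem.Chars.startswith ('^' :: t) ['^'] = true :=
          (PySem.Chars.startswith_iff _ _).mpr ⟨t, rfl⟩
        rw [hsw]
        simp [hlt]
      · have hsw : PySem.Chars.startswith (a :: t) ['^'] = false := by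
          rw [Bool.eq_false_iff]
          intro hco
          obtain ⟨u, hu⟩ := (PySem.Chars.startswith_iff _ _).mp hco
          simp only [List.singleton_append, List.cons.injEq] at hu
          exact ha hu.1.symm
        rw [hsw]
        simp [ha]

theorem content_eq (s : List Char) :
    PySem.List.slice s (some (((if decide (loopA s 0 < s.length) && (PySem.List.pyGet? s ((loopA s 0 : Nat) : Int) == some '^') then loopA s 0 + 1 else loopA s 0) : Nat) : Int)) none
      = (if PySem.Chars.startswith (dropFlagsB s) ['^'] then PySem.List.slice (dropFlagsB s) (some 1) none else dropFlagsB s) := by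
  have hle := loopA_le s 0 (Nat.zero_le _)
  have hkey := loop_eq s 0 (Nat.zero_le _)
  rw [List.drop_zero] at hkey
  rw [← hkey]
  rw [cond_eq s (loopA s 0)]
  by_cases hc : PySem.Chars.startswith (s.drop (loopA s 0)) ['^'] = true
  · rw [if_pos hc, if_pos hc]
    rw [PySem.List.slice_from_natCast s (loopA s 0 + 1)]
    rw [PySem.List.slice_from_one]
    rw [← List.tail_drop]
  · rw [if_neg hc, if_neg hc]
    exact PySem.List.slice_from_natCast s (loopA s 0)

theorem main_eq (pattern : String) : strip_anchors_py pattern = strip_anchors_py_alt pattern := by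
  simp only [strip_anchors_py, strip_anchors_py_alt, content_eq]

-- ===== VERDICT (by name: the statement is the Claim_ definition above) =====
theorem strip_anchors_py_spec : Claim_equal_strip_anchors_py := by
  intro pattern _
  unfold Spec_strip_anchors_py
  exact main_eq pattern
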